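-- pv_equiv track=rewrite | github.com/Aleksander-Bloch/irio-distributed-linters | linters/spaces_around_assignment_linter_v0.py | lint_spaces_around_assignment_v0
-- ===== SOURCE A (Python) =====
-- def lint_spaces_around_assignment_v0(code: str):
--     store = ["", "", ""]
--     for line_no, line in enumerate(code.splitlines()):
--         for char_no, char in enumerate(list(line)):
--             store[2] = store[1]
--             store[1] = store[0]
--             store[0] = char
--             if store[1] == "=" and (store[0] != " " or store[2] != " "):
--                 return False, f"ERROR: no spaces around assignment in ine {line_no + 1} at position {char_no}"
--     return True, "CORRECT: all assignments have spaces around them"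
-- ===== SOURCE B (Python) =====
-- def lint_spaces_around_assignment_v0(code: str):
--     # Flatten the code into (line_no, char_no, char) triples, then judge each
--     # '=' anchor against its flat neighbours (window carries across lines).
--     flat = [(line_no, char_no, char)
--             for line_no, line in enumerate(code.splitlines())
--             for char_no, char in enumerate(line)]
--     for p, c, n in zip([None] + flat, flat, flat[1:]):
--         if c[2] == "=" and (n[2] != " " or p is None or p[2] != " "):
--             return False, f"ERROR: no spaces around assignment in ine {n[0] + 1} at position {n[1]}"
--     return True, "CORRECT: all assignments have spaces around them"
-- ===== Notes on version B (the rewrite author's own statement) =====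
-- stated objective: alternative
-- what changed: Replaces A's stateful three-slot sliding window inside nested loops (with cross-line carryover and early return) by first flattening the code into (line_no, char_no, char) triples and then judging each '=' anchor against its zipped previous/next neighbours in one stateless pass.
import Mathlib
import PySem

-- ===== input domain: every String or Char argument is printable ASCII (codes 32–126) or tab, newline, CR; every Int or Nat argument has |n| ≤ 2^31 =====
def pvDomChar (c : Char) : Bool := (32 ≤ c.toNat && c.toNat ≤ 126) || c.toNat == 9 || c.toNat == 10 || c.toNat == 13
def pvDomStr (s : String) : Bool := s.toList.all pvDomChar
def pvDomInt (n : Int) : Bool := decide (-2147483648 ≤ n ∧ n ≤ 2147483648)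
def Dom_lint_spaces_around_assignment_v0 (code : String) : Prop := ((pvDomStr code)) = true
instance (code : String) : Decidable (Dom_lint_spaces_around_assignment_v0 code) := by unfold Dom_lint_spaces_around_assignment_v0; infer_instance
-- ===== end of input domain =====

-- B flattens the code into (line_no, char_no, char) triples and judges each '='
-- anchor against its zipped neighbours, instead of A's three-slot sliding window
-- carried through nested loops (objective: alternative decomposition, same cost).


-- ===== PORT A =====
-- inner loop: `for char_no, char in enumerate(list(line))` with the store window;
-- .inl = fell off the line with the updated store, .inr = early return
def pvA_inner (line_no : Int) : List (Int × Char) → String × String × String → (String × String × String) ⊕ (Bool × String)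
  | [], s => .inl s
  | (char_no, char) :: rest, (s0, s1, _s2) =>
    let s2' := s1
    let s1' := s0
    let s0' := String.singleton char
    if s1' == "=" && (s0' != " " || s2' != " ") then
      .inr (false, "ERROR: no spaces around assignment in ine " ++ PySem.Int.toStr (line_no + 1)
                    ++ " at position " ++ PySem.Int.toStr char_no)
    else pvA_inner line_no rest (s0', s1', s2')

-- outer loop: `for line_no, line in enumerate(code.splitlines())`
def pvA_outer : List (Int × String) → String × String × String → Bool × String
  | [], _ => (true, "CORRECT: all assignments have spaces around them")
  | (line_no, line) :: rest, s =>
    match pvA_inner line_no (PySem.List.enumerate line.toList) s with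
    | .inl s' => pvA_outer rest s'
    | .inr r => r

def lint_spaces_around_assignment_v0 (code : String) : Bool × String :=
  pvA_outer (PySem.List.enumerate (PySem.Str.splitlines code)) ("", "", "")

-- ===== PORT B =====
-- `for p, c, n in zip([None] + flat, flat, flat[1:]): …`
def pvB_loop : List (Option (Int × Int × Char) × (Int × Int × Char) × (Int × Int × Char)) → Bool × String
  | [] => (true, "CORRECT: all assignments have spaces around them")
  | (p, c, n) :: rest =>
    if c.2.2 == '=' && (n.2.2 != ' ' || (match p with | none => true | some q => q.2.2 != ' ')) then
      (false, "ERROR: no spaces around assignment in ine " ++ PySem.Int.toStr (n.1 + 1)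
               ++ " at position " ++ PySem.Int.toStr n.2.1)
    else pvB_loop rest

def lint_spaces_around_assignment_v0_alt (code : String) : Bool × String :=
  let flat := (PySem.List.enumerate (PySem.Str.splitlines code)).flatMap
    (fun ll => (PySem.List.enumerate ll.2.toList).map (fun cc => (ll.1, cc.1, cc.2)))
  pvB_loop ((none :: flat.map some).zip (flat.zip flat.tail))

-- ===== PRECONDITION & SPEC =====
def Spec_lint_spaces_around_assignment_v0 (code : String) (out : Bool × String) : Prop := out = lint_spaces_around_assignment_v0_alt code
instance (code : String) (out : Bool × String) : Decidable (Spec_lint_spaces_around_assignment_v0 code out) := by unfold Spec_lint_spaces_around_assignment_v0; infer_instance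

-- ===== CLAIM (what is proved, stated in full; the proofs are below) =====
def Claim_equal_lint_spaces_around_assignment_v0 : Prop := ∀ (code : String), Dom_lint_spaces_around_assignment_v0 code → Spec_lint_spaces_around_assignment_v0 code (lint_spaces_around_assignment_v0 code)

-- ===== LEMMAS AND PROOFS =====

-- A's nested loops, re-expressed as one pass over the flattened triples
def pvFlatLoop : List (Int × Int × Char) → String × String × String → Bool × String
  | [], _ => (true, "CORRECT: all assignments have spaces around them")
  | (line_no, char_no, char) :: rest, (s0, s1, _s2) =>
    let s2' := s1
    let s1' := s0
    let s0' := String.singleton char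
    if s1' == "=" && (s0' != " " || s2' != " ") then
      (false, "ERROR: no spaces around assignment in ine " ++ PySem.Int.toStr (line_no + 1)
               ++ " at position " ++ PySem.Int.toStr char_no)
    else pvFlatLoop rest (s0', s1', s2')

-- the neighbour-zip of a list, built structurally
def pvMkZip (p : Option (Int × Int × Char)) : List (Int × Int × Char) → List (Option (Int × Int × Char) × (Int × Int × Char) × (Int × Int × Char))
  | [] => []
  | [_] => []
  | a :: b :: rest => (p, a, b) :: pvMkZip (some a) (b :: rest)

theorem pvZip_eq (l : List (Int × Int × Char)) (p : Option (Int × Int × Char)) :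
    (p :: l.map some).zip (l.zip l.tail) = pvMkZip p l := by
  induction l generalizing p with
  | nil => rfl
  | cons a t ih =>
    cases t with
    | nil => rfl
    | cons b rest =>
      simp only [List.map, List.tail, List.zip, List.zipWith, pvMkZip]
      exact congrArg _ (ih (some a))

def pvOstr : Option (Int × Int × Char) → String
  | none => ""
  | some q => String.singleton q.2.2

theorem pvSing_beq (c d : Char) : (String.singleton c == String.singleton d) = (c == d) := by
  rcases h : c == d with _ | _
  · simp only [beq_eq_false_iff_ne, ne_eq] at h ⊢
    intro hs; exact h (by simpa [String.singleton] using hs)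
  · simp only [beq_iff_eq] at h; subst h; simp

theorem pvOstr_space (p : Option (Int × Int × Char)) :
    (pvOstr p != " ") = (match p with | none => true | some q => q.2.2 != ' ') := by
  cases p with
  | none => rfl
  | some q =>
    show (String.singleton q.2.2 != String.singleton ' ') = _
    simp [bne, pvSing_beq]

-- core: the flat window loop is B's zipped stateless loop
theorem pvFlat_eq_B (l : List (Int × Int × Char)) (p1 p2 : Option (Int × Int × Char)) (s2 : String) :
    pvFlatLoop l (pvOstr p1, pvOstr p2, s2) =
      pvB_loop (match p1 with | some c => pvMkZip p2 (c :: l) | none => pvMkZip none l) := by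
  induction l generalizing p1 p2 s2 with
  | nil =>
    cases p1 <;> rfl
  | cons a rest ih =>
    cases p1 with
    | none =>
      show pvFlatLoop (a :: rest) ("", pvOstr p2, s2) = pvB_loop (pvMkZip none (a :: rest))
      simp only [pvFlatLoop]
      have h0 : (("" : String) == "=") = false := by decide
      rw [h0, Bool.false_and]
      simp only [Bool.false_eq_true, if_false]
      exact ih (some a) none (pvOstr p2)
    | some c =>
      show pvFlatLoop (a :: rest) (String.singleton c.2.2, pvOstr p2, s2) =
        pvB_loop ((p2, c, a) :: pvMkZip (some c) (a :: rest))
      simp only [pvFlatLoop, pvB_loop]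
      have hcond : (String.singleton c.2.2 == "=" && (String.singleton a.2.2 != " " || pvOstr p2 != " "))
          = (c.2.2 == '=' && (a.2.2 != ' ' || (match p2 with | none => true | some q => q.2.2 != ' '))) := by
        have h1 : (String.singleton c.2.2 == "=") = (c.2.2 == '=') := by
          have he : ("=" : String) = String.singleton '=' := rfl
          rw [he, pvSing_beq]
        have h2 : (String.singleton a.2.2 != " ") = (a.2.2 != ' ') := by
          have he : (" " : String) = String.singleton ' ' := rfl
          rw [he, bne, bne, pvSing_beq]
        rw [h1, h2, pvOstr_space]
      exact if_congr (by rw [hcond]) rfl (ih (some a) (some c) (pvOstr p2))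

-- A's nested loop equals the flat loop over the flattened triples
theorem pvInner_flat (line_no : Int) (pairs : List (Int × Char)) (ys : List (Int × Int × Char)) (s : String × String × String) :
    pvFlatLoop ((pairs.map (fun cc => (line_no, cc.1, cc.2))) ++ ys) s =
      (match pvA_inner line_no pairs s with
       | .inl s' => pvFlatLoop ys s'
       | .inr r => r) := by
  induction pairs generalizing s with
  | nil => rfl
  | cons q rest ih =>
    obtain ⟨s0, s1, s2⟩ := s
    simp only [List.map, List.cons_append, pvFlatLoop, pvA_inner]
    split
    · rfl
    · exact ih _

theorem pvOuter_flat (lines : List (Int × String)) (s : String × String × String) :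
    pvA_outer lines s =
      pvFlatLoop (lines.flatMap (fun ll => (PySem.List.enumerate ll.2.toList).map (fun cc => (ll.1, cc.1, cc.2)))) s := by
  induction lines generalizing s with
  | nil => rfl
  | cons l rest ih =>
    simp only [pvA_outer, List.flatMap_cons]
    rw [pvInner_flat]
    cases h : pvA_inner l.1 (PySem.List.enumerate l.2.toList) s with
    | inl s' => simpa using ih s'
    | inr r => simp

-- ===== VERDICT (by name: the statement is the Claim_ definition above) =====
theorem lint_spaces_around_assignment_v0_spec : Claim_equal_lint_spaces_around_assignment_v0 := by
  intro code _
  show lint_spaces_around_assignment_v0 code = lint_spaces_around_assignment_v0_alt code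
  unfold lint_spaces_around_assignment_v0 lint_spaces_around_assignment_v0_alt
  rw [pvOuter_flat]
  show pvFlatLoop
      ((PySem.List.enumerate (PySem.Str.splitlines code)).flatMap
        (fun ll => (PySem.List.enumerate ll.2.toList).map (fun cc => (ll.1, cc.1, cc.2)))) ("", "", "") =
    pvB_loop ((none :: (((PySem.List.enumerate (PySem.Str.splitlines code)).flatMap
        (fun ll => (PySem.List.enumerate ll.2.toList).map (fun cc => (ll.1, cc.1, cc.2)))).map some)).zip
      (((PySem.List.enumerate (PySem.Str.splitlines code)).flatMap
        (fun ll => (PySem.List.enumerate ll.2.toList).map (fun cc => (ll.1, cc.1, cc.2)))).zip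
       ((PySem.List.enumerate (PySem.Str.splitlines code)).flatMap
        (fun ll => (PySem.List.enumerate ll.2.toList).map (fun cc => (ll.1, cc.1, cc.2)))).tail))
  rw [pvZip_eq]
  exact pvFlat_eq_B
    ((PySem.List.enumerate (PySem.Str.splitlines code)).flatMap
      (fun ll => (PySem.List.enumerate ll.2.toList).map (fun cc => (ll.1, cc.1, cc.2))))
    none none ""
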